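-- pv_equiv track=rewrite | github.com/FabioLiberti/RESerch_MON | backend/app/api/paper_analysis.py | _split_md_sections
-- ===== SOURCE A (Python) =====
-- def _split_md_sections(md_text: str) -> dict[str, str]:
--     """Split a markdown analysis into sections by H2 headings (## Section)."""
--     if not md_text:
--         return {}
--     sections: dict[str, str] = {}
--     current = "_preamble"
--     buffer: list[str] = []
--     for line in md_text.splitlines():
--         if line.startswith("## "):
--             if buffer:
--                 sections[current] = "\n".join(buffer).strip()
--             current = line[3:].strip()
--             buffer = []
--         else:
--             buffer.append(line)
--     if buffer:
--         sections[current] = "\n".join(buffer).strip()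
--     return sections
-- ===== SOURCE B (Python) =====
-- def _split_md_sections(md_text: str) -> dict[str, str]:
--     """Split a markdown analysis into sections by H2 headings (## Section)."""
--     if not md_text:
--         return {}
--     lines = md_text.splitlines()
--     # Cut points: each H2 heading line starts a new section; a final sentinel
--     # cut at len(lines) closes the last one.
--     cuts = [i for i, ln in enumerate(lines) if ln.startswith("## ")] + [len(lines)]
--     segments = [("_preamble", lines[: cuts[0]])]
--     segments += [
--         (lines[h][3:].strip(), lines[h + 1 : stop])
--         for h, stop in zip(cuts, cuts[1:])
--     ]
--     return {name: "\n".join(body).strip() for name, body in segments if body}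
-- ===== Notes on version B (the rewrite author's own statement) =====
-- stated objective: alternative
-- what changed: B first locates the H2 heading line indices, builds each section as an index slice lines[h+1:next_cut] (plus the preamble slice lines[:first_cut]), then emits the non-empty segments into the dict; A accumulates a running buffer and flushes it into the dict at each heading inside one stateful loop.
import Mathlib
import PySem

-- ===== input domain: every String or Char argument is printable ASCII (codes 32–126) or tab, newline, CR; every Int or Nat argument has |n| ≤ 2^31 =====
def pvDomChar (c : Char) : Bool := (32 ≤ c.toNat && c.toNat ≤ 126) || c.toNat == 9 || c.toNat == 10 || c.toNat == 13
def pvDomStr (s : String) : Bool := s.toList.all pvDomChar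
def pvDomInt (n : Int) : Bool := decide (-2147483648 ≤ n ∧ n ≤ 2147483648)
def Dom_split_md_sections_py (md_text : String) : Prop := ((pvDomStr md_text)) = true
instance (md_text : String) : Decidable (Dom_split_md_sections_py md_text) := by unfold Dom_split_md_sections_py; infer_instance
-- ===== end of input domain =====

-- B locates the H2 heading indices first, builds each section as an index slice, then
-- emits the non-empty segments; A flushes a running buffer into the dict at each heading.
-- Same cost; objective: alternative (slice-based) decomposition.

-- ===== PORT A =====
-- line[3:].strip()
def pvNameA (line : String) : String :=
  PySem.Str.strip (PySem.Str.slice line (some 3) none)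

-- loop body of A: state (sections, current, buffer)
def pvStepA (st : PySem.Dict String String × String × List String) (line : String) :
    PySem.Dict String String × String × List String :=
  if PySem.Str.startswith line "## " then
    ((if st.2.2 ≠ [] then st.1.insert st.2.1 (PySem.Str.strip (PySem.Str.join "\n" st.2.2)) else st.1),
     pvNameA line, [])
  else
    (st.1, st.2.1, st.2.2 ++ [line])

def split_md_sections_py (md_text : String) : List (String × String) :=
  if md_text = "" then []
  else
    let st := (PySem.Str.splitlines md_text).foldl pvStepA (PySem.Dict.empty, "_preamble", [])
    let sections :=
      if st.2.2 ≠ [] then st.1.insert st.2.1 (PySem.Str.strip (PySem.Str.join "\n" st.2.2)) else st.1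
    sections.items

-- ===== PORT B =====
-- the comprehension [i for i, ln in enumerate(lines) if ln.startswith("## ")] + [len(lines)]
def pvCutsB (lines : List String) : List Int :=
  (PySem.List.enumerate lines).filterMap
    (fun p => if PySem.Str.startswith p.2 "## " then some p.1 else none) ++ [(lines.length : Int)]

-- one element of the segment comprehension: (lines[h][3:].strip(), lines[h+1:stop]);
-- lines[h] is always in range (h is an enumerate index), so the IndexError default is never used
def pvSegB (lines : List String) (p : Int × Int) : String × List String :=
  (PySem.Str.strip (PySem.Str.slice ((PySem.List.pyGet? lines p.1).getD "") (some 3) none),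
   PySem.List.slice lines (some (p.1 + 1)) (some p.2))

-- the dict comprehension {name: "\n".join(body).strip() for name, body in segments if body}
def pvEmitB (d : PySem.Dict String String) (seg : String × List String) : PySem.Dict String String :=
  if seg.2 ≠ [] then d.insert seg.1 (PySem.Str.strip (PySem.Str.join "\n" seg.2)) else d

def split_md_sections_py_alt (md_text : String) : List (String × String) :=
  if md_text = "" then []
  else
    let lines := PySem.Str.splitlines md_text
    let cuts := pvCutsB lines
    -- cuts[0]: cuts is nonempty (it ends with len(lines)), so headD's default is never used
    let segments := ("_preamble", PySem.List.slice lines none (some (cuts.headD 0))) ::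
      (cuts.zip cuts.tail).map (pvSegB lines)
    (segments.foldl pvEmitB PySem.Dict.empty).items

-- ===== PRECONDITION & SPEC =====
def Spec_split_md_sections_py (md_text : String) (out : List (String × String)) : Prop := out = split_md_sections_py_alt md_text
instance (md_text : String) (out : List (String × String)) : Decidable (Spec_split_md_sections_py md_text out) := by unfold Spec_split_md_sections_py; infer_instance

-- ===== CLAIM (what is proved, stated in full; the proofs are below) =====
def Claim_equal_split_md_sections_py : Prop := ∀ (md_text : String), Dom_split_md_sections_py md_text → Spec_split_md_sections_py md_text (split_md_sections_py md_text)

-- ===== LEMMAS AND PROOFS =====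

-- reference decomposition: (leading body lines, remaining (name, body) segments)
def pvSegsF : List String → List String × List (String × List String)
  | [] => ([], [])
  | l :: ls =>
    let (b, s) := pvSegsF ls
    if PySem.Str.startswith l "## " then ([], (pvNameA l, b) :: s) else (l :: b, s)

-- A's trailing flush
def pvFinishA (st : PySem.Dict String String × String × List String) : PySem.Dict String String :=
  if st.2.2 ≠ [] then st.1.insert st.2.1 (PySem.Str.strip (PySem.Str.join "\n" st.2.2)) else st.1

lemma pvA_fold (ls : List String) :
    ∀ (d : PySem.Dict String String) (c : String) (b : List String),
    pvFinishA (ls.foldl pvStepA (d, c, b)) =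
      ((c, b ++ (pvSegsF ls).1) :: (pvSegsF ls).2).foldl pvEmitB d := by
  induction ls with
  | nil =>
    intro d c b
    simp [pvSegsF, pvFinishA, pvEmitB]
  | cons l ls ih =>
    intro d c b
    by_cases h : PySem.Str.startswith l "## "
    · simp only [List.foldl_cons, pvStepA, h, if_pos, pvSegsF]
      rw [ih]
      simp [pvEmitB]
    · simp only [List.foldl_cons, pvStepA, h, pvSegsF]
      rw [ih]
      simp

-- Nat-valued cut points (heads ++ [length])
def pvCutsN : List String → List Nat
  | [] => [0]
  | l :: ls =>
    if PySem.Str.startswith l "## " then 0 :: (pvCutsN ls).map (· + 1)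
    else (pvCutsN ls).map (· + 1)

lemma pvCutsN_ne_nil (ls : List String) : pvCutsN ls ≠ [] := by
  cases ls with
  | nil => simp [pvCutsN]
  | cons l ls => simp [pvCutsN]; split <;> simp [pvCutsN_ne_nil ls]

lemma pvCutsB_eq_aux (ls : List String) : ∀ (s : Int),
    (PySem.List.enumerate ls s).filterMap
        (fun p => if PySem.Str.startswith p.2 "## " then some p.1 else none)
      ++ [s + (ls.length : Int)] = (pvCutsN ls).map (fun n : Nat => s + (n : Int)) := by
  induction ls with
  | nil => intro s; simp [PySem.List.enumerate_nil, pvCutsN]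
  | cons l ls ih =>
    intro s
    have hc : ((pvCutsN ls).map (fun n : Nat => n + 1)).map (fun n : Nat => s + (n : Int)) =
        (pvCutsN ls).map (fun n : Nat => (s + 1) + (n : Int)) := by
      rw [List.map_map]
      apply List.map_congr_left
      intro n _
      show s + ((n + 1 : Nat) : Int) = (s + 1) + (n : Int)
      push_cast; ring
    have hlen : s + ((l :: ls).length : Int) = (s + 1) + (ls.length : Int) := by
      simp only [List.length_cons]; push_cast; ring
    rw [PySem.List.enumerate_cons, List.filterMap_cons]
    simp only [pvCutsN]
    by_cases h : PySem.Str.startswith l "## " = true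
    · rw [if_pos h, if_pos h, List.cons_append, hlen, ih (s + 1), List.map_cons, hc]
      simp
    · rw [if_neg h, if_neg h, hlen, ih (s + 1), hc]

lemma pvCutsB_eq (ls : List String) :
    pvCutsB ls = (pvCutsN ls).map (fun n : Nat => (n : Int)) := by
  have := pvCutsB_eq_aux ls 0
  simp only [zero_add] at this
  simpa [pvCutsB] using this

-- Nat-level segment of B
def pvSegN (lines : List String) (p : Nat × Nat) : String × List String :=
  (pvNameA (lines.getD p.1 ""), (lines.drop (p.1 + 1)).take (p.2 - (p.1 + 1)))

lemma pvB_preamble (ls : List String) :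
    ls.take ((pvCutsN ls).headD 0) = (pvSegsF ls).1 := by
  induction ls with
  | nil => simp [pvCutsN, pvSegsF]
  | cons l ls ih =>
    obtain ⟨c, cs, hc⟩ := List.exists_cons_of_ne_nil (pvCutsN_ne_nil ls)
    simp only [pvCutsN, pvSegsF]
    by_cases h : PySem.Str.startswith l "## " = true
    · rw [if_pos h, if_pos h]
      simp
    · rw [if_neg h, if_neg h, hc]
      simp only [List.map_cons, List.headD_cons, List.take_succ_cons]
      rw [← ih, hc]
      simp

-- shifting every index by one steps pvSegN from l :: ls to ls
lemma pvSegN_shift (l : String) (ls : List String) (p : Nat × Nat) :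
    pvSegN (l :: ls) (p.1 + 1, p.2 + 1) = pvSegN ls p := by
  simp only [pvSegN, List.getD_cons_succ, List.drop_succ_cons]
  congr 2
  omega

lemma pvB_segments (ls : List String) :
    ((pvCutsN ls).zip (pvCutsN ls).tail).map (pvSegN ls) = (pvSegsF ls).2 := by
  induction ls with
  | nil => simp [pvCutsN, pvSegsF]
  | cons l ls ih =>
    obtain ⟨c, cs, hc⟩ := List.exists_cons_of_ne_nil (pvCutsN_ne_nil ls)
    have hshift : ∀ (m : List Nat),
        (((m.map (fun n : Nat => n + 1)).zip ((m.map (fun n : Nat => n + 1)).tail)).map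
            (pvSegN (l :: ls))) = (m.zip m.tail).map (pvSegN ls) := by
      intro m
      rw [← List.map_tail, List.zip_map, List.map_map]
      apply List.map_congr_left
      intro p _
      have := pvSegN_shift l ls p
      simpa [Prod.map] using this
    simp only [pvCutsN, pvSegsF]
    by_cases h : PySem.Str.startswith l "## " = true
    · rw [if_pos h, if_pos h, hc]
      simp only [List.map_cons, List.tail_cons, List.zip_cons_cons, List.map_cons]
      have hfst : pvSegN (l :: ls) (0, c + 1) = (pvNameA l, (pvSegsF ls).1) := by
        simp only [pvSegN, List.getD_cons_zero, List.drop_succ_cons, List.drop_zero,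
          Nat.add_sub_cancel]
        rw [← pvB_preamble ls, hc]
        simp
      rw [hfst]
      have := hshift (c :: cs)
      simp only [List.map_cons, List.tail_cons] at this
      rw [hc, List.tail_cons] at ih
      rw [this, ih]
    · rw [if_neg h, if_neg h]
      rw [hshift, ih]

-- on Nat-cast indices, B's segment builder is the Nat-level one
lemma pvSegB_natCast (lines : List String) (p : Nat × Nat) :
    pvSegB lines ((p.1 : Int), (p.2 : Int)) = pvSegN lines p := by
  unfold pvSegB pvSegN pvNameA
  rw [PySem.List.pyGet?_natCast, List.getD_eq_getElem?_getD,
    show ((p.1 : Int) + 1) = ((p.1 + 1 : Nat) : Int) by push_cast; ring,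
    PySem.List.slice_natCast]

-- B's whole segment list is the reference decomposition
lemma pvB_list (ls : List String) :
    ("_preamble", PySem.List.slice ls none (some ((pvCutsB ls).headD 0))) ::
      ((pvCutsB ls).zip (pvCutsB ls).tail).map (pvSegB ls) =
    ("_preamble", (pvSegsF ls).1) :: (pvSegsF ls).2 := by
  obtain ⟨c, cs, hc⟩ := List.exists_cons_of_ne_nil (pvCutsN_ne_nil ls)
  rw [pvCutsB_eq, hc]
  simp only [List.map_cons, List.headD_cons, List.tail_cons]
  congr 1
  · rw [PySem.List.slice_to_natCast, ← pvB_preamble ls, hc, List.headD_cons]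
  · rw [show ((c : Int) :: cs.map (fun n : Nat => (n : Int))) =
        (c :: cs).map (fun n : Nat => (n : Int)) by simp,
      List.zip_map, List.map_map]
    rw [← pvB_segments ls, hc, List.tail_cons]
    apply List.map_congr_left
    intro p _
    have := pvSegB_natCast ls p
    simpa [Prod.map] using this

-- ===== VERDICT (by name: the statement is the Claim_ definition above) =====
theorem split_md_sections_py_spec : Claim_equal_split_md_sections_py := by
  intro md _
  unfold Spec_split_md_sections_py split_md_sections_py split_md_sections_py_alt
  by_cases h : md = ""
  · simp [h]
  · simp only [h, if_false]
    have hA := pvA_fold (PySem.Str.splitlines md) PySem.Dict.empty "_preamble" []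
    simp only [List.nil_append] at hA
    show (pvFinishA ((PySem.Str.splitlines md).foldl pvStepA (PySem.Dict.empty, "_preamble", []))).items = _
    rw [hA]
    show _ = ((("_preamble",
        PySem.List.slice (PySem.Str.splitlines md) none (some ((pvCutsB (PySem.Str.splitlines md)).headD 0))) ::
      ((pvCutsB (PySem.Str.splitlines md)).zip (pvCutsB (PySem.Str.splitlines md)).tail).map
        (pvSegB (PySem.Str.splitlines md))).foldl pvEmitB PySem.Dict.empty).items
    rw [pvB_list]
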